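-- pv_equiv track=rewrite | github.com/colgate-cs-research/config-mining | parsing/cleanup_symbols.py | invert_table
-- ===== SOURCE A (Python) =====
-- def invert_table(symbol_table):
--     inverted_table = {}
--     for symbol_name, symbol_types in symbol_table.items():
--         for symbol_type in symbol_types:
--             if symbol_type not in inverted_table:
--                 inverted_table[symbol_type] = []
--             if symbol_name not in inverted_table[symbol_type]: #changed
--                 inverted_table[symbol_type].append(symbol_name)
--     return inverted_table
-- ===== SOURCE B (Python) =====
-- def invert_table(symbol_table):
--     # Transposed strategy: fix the output key order first (first occurrence of each
--     # type in the flattened iteration), then compute each type's row by a scan of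
--     # the whole table, instead of growing per-type lists pair by pair.
--     type_order = dict.fromkeys(t for types in symbol_table.values() for t in types)
--     items = [(name, set(types)) for name, types in symbol_table.items()]
--     return {t: [name for name, tset in items if t in tset] for t in type_order}
-- ===== Notes on version B (the rewrite author's own statement) =====
-- stated objective: alternative
-- what changed: B transposes the computation: instead of A's single pass that grows per-type lists pair by pair with a membership check, B first fixes the output key order by deduplicating the flattened type stream, precomputes each symbol's type set, and then computes each type's whole row with an independent scan of the table; no accumulator dict is mutated.
import Mathlib
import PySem

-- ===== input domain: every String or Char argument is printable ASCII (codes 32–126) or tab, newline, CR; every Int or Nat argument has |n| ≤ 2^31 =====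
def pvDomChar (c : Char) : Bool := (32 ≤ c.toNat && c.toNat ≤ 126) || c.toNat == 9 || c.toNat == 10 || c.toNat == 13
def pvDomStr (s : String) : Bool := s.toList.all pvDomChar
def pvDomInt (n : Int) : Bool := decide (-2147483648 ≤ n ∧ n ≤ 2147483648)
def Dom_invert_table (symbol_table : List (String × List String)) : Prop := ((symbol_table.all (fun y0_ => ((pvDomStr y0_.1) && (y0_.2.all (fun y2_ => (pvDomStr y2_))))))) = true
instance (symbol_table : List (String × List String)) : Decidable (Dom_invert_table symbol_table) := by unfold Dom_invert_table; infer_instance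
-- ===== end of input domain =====

-- B transposes A's accumulation: it fixes the type order by deduplicating the flattened
-- type stream, then computes each type's whole row with an independent scan of the table.

-- ===== PORT A =====
-- A's inner-loop body: insert an empty list for a new type, then append the name only if absent.
def stepA (name : String) (inv : PySem.Dict String (List String)) (ty : String) :
    PySem.Dict String (List String) :=
  let inv1 := if inv.contains ty then inv else inv.insert ty []
  if name ∈ inv1.getD ty [] then inv1 else inv1.insert ty (inv1.getD ty [] ++ [name])

def invert_table (symbol_table : List (String × List String)) : List (String × List String) :=
  (symbol_table.foldl (fun inv p => p.2.foldl (stepA p.1) inv) PySem.Dict.empty).items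

-- ===== PORT B =====
-- Source B: type_order = dict.fromkeys(flattened types); items = [(name, set(types)) ...];
-- then a dict comprehension {t: [name for name, tset in items if t in tset] for t in type_order}.
def invert_table_alt (symbol_table : List (String × List String)) : List (String × List String) :=
  let type_order := PySem.List.dedup (symbol_table.flatMap (fun p => p.2))
  let items := symbol_table.map (fun p => (p.1, PySem.Set.ofList p.2))
  (PySem.Dict.ofList (type_order.map (fun t =>
      (t, (items.filter (fun q => PySem.Set.contains q.2 t)).map Prod.fst)))).items

-- ===== PRECONDITION & SPEC =====
-- Pre_ requires distinct symbol names: the Python argument is a dict, whose keys are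
-- necessarily distinct; a List encoding with duplicate first components represents no
-- dict input, so nothing is excluded that Python's A can actually receive.
def Pre_invert_table (symbol_table : List (String × List String)) : Prop :=
  (symbol_table.map Prod.fst).Nodup
instance (symbol_table : List (String × List String)) : Decidable (Pre_invert_table symbol_table) := by unfold Pre_invert_table; infer_instance

def pvWitness_invert_table : (List (String × List String)) :=
  [("a", ["t", "u"]), ("b", ["t"])]

def Spec_invert_table (symbol_table : List (String × List String)) (out : List (String × List String)) : Prop := out = invert_table_alt symbol_table
instance (symbol_table : List (String × List String)) (out : List (String × List String)) : Decidable (Spec_invert_table symbol_table out) := by unfold Spec_invert_table; infer_instance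

-- ===== CLAIM (what is proved, stated in full; the proofs are below) =====
def Claim_equal_invert_table : Prop := ∀ (symbol_table : List (String × List String)), Dom_invert_table symbol_table → Pre_invert_table symbol_table → Spec_invert_table symbol_table (invert_table symbol_table)

-- ===== LEMMAS AND PROOFS =====

-- B's per-type row: names of the symbols whose type list contains t.
def pvGather (st : List (String × List String)) (t : String) : List String :=
  (st.filter (fun p => p.2.contains t)).map Prod.fst

-- one outer-loop iteration of A
def pvStep (inv : PySem.Dict String (List String)) (p : String × List String) :
    PySem.Dict String (List String) :=
  p.2.foldl (stepA p.1) inv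

-- folding Set.add over ys appends the first occurrences of the elements not already in s
theorem pv_foldl_add (ys : List String) (s : List String) :
    ys.foldl PySem.Set.add s = s ++ (PySem.List.dedup ys).filter (fun y => !s.contains y) := by
  induction ys generalizing s with
  | nil => simp [PySem.List.dedup, PySem.Set.ofList]
  | cons y ys ih =>
      have hdc : PySem.List.dedup (y :: ys)
          = [y] ++ (PySem.List.dedup ys).filter (fun x => !([y] : List String).contains x) := by
        have h0 : PySem.List.dedup (y :: ys) = ys.foldl PySem.Set.add [y] := by
          simp [PySem.List.dedup_eq_ofList, PySem.Set.ofList_eq_foldl, List.foldl_cons,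
            PySem.Set.add, PySem.Set.contains]
        rw [h0, ih]
      rw [List.foldl_cons, ih, hdc]
      by_cases hy : s.contains y = true
      · have hym : y ∈ s := List.contains_iff_mem.mp hy
        have ha : PySem.Set.add s y = s := by
          simp [PySem.Set.add, PySem.Set.contains, hym]
        rw [ha]
        simp only [List.filter_append, List.filter_filter]
        rw [show (List.filter (fun y_1 => !s.contains y_1) [y]) = [] by simp [hym]]
        rw [List.nil_append]
        congr 1
        apply List.filter_congr
        intro x _
        by_cases hxy : x = y
        · subst hxy; simp [hym]
        · have hb : (y == x) = false := beq_eq_false_iff_ne.mpr fun hh => hxy hh.symm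
          simp [hb]
          exact fun _ => hxy
      · have hym : y ∉ s := fun h => hy (List.contains_iff_mem.mpr h)
        have ha : PySem.Set.add s y = s ++ [y] := by
          simp [PySem.Set.add, PySem.Set.contains, hym]
        rw [ha]
        simp only [List.filter_append, List.filter_filter, List.append_assoc]
        rw [show (List.filter (fun y_1 => !s.contains y_1) [y]) = [y] by simp [hym]]
        congr 2
        apply List.filter_congr
        intro x _
        by_cases hxy : x = y
        · subst hxy; simp [hym]
        · have hb : (y == x) = false := beq_eq_false_iff_ne.mpr fun hh => hxy hh.symm
          simp [List.contains_append, hb, hxy]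

-- dedup of a cons
theorem pv_dedup_cons (y : String) (ys : List String) :
    PySem.List.dedup (y :: ys)
      = y :: (PySem.List.dedup ys).filter (fun x => !(y == x)) := by
  have h0 : PySem.List.dedup (y :: ys) = ys.foldl PySem.Set.add [y] := by
    simp [PySem.List.dedup_eq_ofList, PySem.Set.ofList_eq_foldl, List.foldl_cons,
      PySem.Set.add, PySem.Set.contains]
  rw [h0, pv_foldl_add]
  simp only [List.contains_cons, List.contains_nil, Bool.or_false, List.singleton_append]
  congr 1
  apply List.filter_congr
  intro x _
  simp [BEq.comm]

-- dedup splits over append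
theorem pv_dedup_append (xs ys : List String) :
    PySem.List.dedup (xs ++ ys)
      = PySem.List.dedup xs ++ (PySem.List.dedup ys).filter (fun y => !xs.contains y) := by
  have h0 : PySem.List.dedup (xs ++ ys) = ys.foldl PySem.Set.add (PySem.List.dedup xs) := by
    simp [PySem.List.dedup_eq_ofList, PySem.Set.ofList_eq_foldl, List.foldl_append]
  rw [h0, pv_foldl_add]
  congr 1
  apply List.filter_congr
  intro x _
  have h1 : (PySem.List.dedup xs).contains x = decide (x ∈ PySem.List.dedup xs) := by simp
  have h2 : xs.contains x = decide (x ∈ xs) := by simp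
  rw [h1, h2]
  simp [PySem.List.mem_dedup]

-- the three shapes of A's inner-loop body
theorem pv_stepA_not_contains (name ty : String) (d : PySem.Dict String (List String))
    (h : d.contains ty = false) : stepA name d ty = d.insert ty [name] := by
  simp only [stepA, h, Bool.false_eq_true, if_false]
  rw [PySem.Dict.getD_insert_self]
  simp [PySem.Dict.insert_insert_self]

theorem pv_stepA_mem (name ty : String) (d : PySem.Dict String (List String))
    (hc : d.contains ty = true) (hm : name ∈ d.getD ty []) : stepA name d ty = d := by
  simp [stepA, hc, hm]

theorem pv_stepA_app (name ty : String) (d : PySem.Dict String (List String))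
    (hc : d.contains ty = true) (hm : name ∉ d.getD ty []) :
    stepA name d ty = d.insert ty (d.getD ty [] ++ [name]) := by
  simp [stepA, hc, hm]

-- dropping the head of a dedup'd cons under a filter that rejects the head
theorem pv_nk_filter (t : String) (ts : List String) (p : String → Bool) (hpt : p t = false) :
    (PySem.List.dedup (t :: ts)).filter p = (PySem.List.dedup ts).filter p := by
  rw [pv_dedup_cons]
  simp only [List.filter_cons, hpt, List.filter_filter]
  apply List.filter_congr
  intro x hx
  by_cases hxt : x = t
  · subst hxt; simp [hpt]
  · have hb : (t == x) = false := beq_eq_false_iff_ne.mpr fun hh => hxt hh.symm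
    simp [hb]

-- characterization of A's inner loop over one symbol's type list
theorem pv_inner (name : String) (tys : List String)
    (d : PySem.Dict String (List String)) (hnd : d.keys.Nodup) :
    (tys.foldl (stepA name) d).items
      = d.items.map (fun q =>
          if tys.contains q.1 && !q.2.contains name then (q.1, q.2 ++ [name]) else q)
        ++ ((PySem.List.dedup tys).filter (fun t => !d.contains t)).map
              (fun t => (t, [name])) := by
  induction tys generalizing d with
  | nil => simp [PySem.List.dedup]
  | cons t ts ih =>
      rw [List.foldl_cons]
      by_cases hc : d.contains t = true
      · by_cases hm : name ∈ d.getD t []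
        · -- duplicate name for an existing type: the step is a no-op
          rw [pv_stepA_mem name t d hc hm, ih d hnd]
          congr 1
          · apply List.map_congr_left
            intro q hq
            by_cases hqt : q.1 = t
            · have hv : d.getD q.1 [] = q.2 := PySem.Dict.getD_of_mem_items d hq hnd []
              have hmem : name ∈ q.2 := by rw [← hv, hqt]; exact hm
              simp [hmem]
            · simp [hqt]
          · rw [pv_nk_filter t ts _ (by simp [hc])]
        · -- new name for an existing type: append it to that type's list
          rw [pv_stepA_app name t d hc hm]
          have hkeys : (d.insert t (d.getD t [] ++ [name])).keys = d.keys :=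
            PySem.Dict.keys_insert_of_contains d _ hc
          rw [ih _ (by rw [hkeys]; exact hnd)]
          rw [PySem.Dict.items_insert_of_contains d _ hc, List.map_map]
          congr 1
          · apply List.map_congr_left
            intro q hq
            by_cases hqt : q.1 = t
            · have hv : d.getD q.1 [] = q.2 := PySem.Dict.getD_of_mem_items d hq hnd []
              have hb : (q.1 == t) = true := by simp [hqt]
              have hnm : name ∉ q.2 := by rw [← hv, hqt]; exact hm
              have hveq : d.getD t [] = q.2 := by rw [← hqt]; exact hv
              simp [Function.comp, hb, hqt, hnm, hveq]
            · have hb : (q.1 == t) = false := beq_eq_false_iff_ne.mpr hqt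
              simp [Function.comp, hb, hqt]
          · have hcont : (fun x => !(d.insert t (d.getD t [] ++ [name])).contains x)
                = (fun x => !d.contains x) := by
              funext x
              rw [PySem.Dict.contains_eq_decide_mem_keys, hkeys,
                ← PySem.Dict.contains_eq_decide_mem_keys]
            rw [hcont, pv_nk_filter t ts _ (by simp [hc])]
      · -- fresh type: the step appends (t, [name])
        have hcf : d.contains t = false := by simpa using hc
        rw [pv_stepA_not_contains name t d hcf]
        have htk : t ∉ d.keys := by
          intro h
          rw [PySem.Dict.contains_eq_decide_mem_keys] at hcf
          simp [h] at hcf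
        have hkeys : (d.insert t [name]).keys = d.keys ++ [t] := by
          simp only [PySem.Dict.keys, PySem.Dict.items_insert_of_not_contains d _ hcf]
          simp
        rw [ih _ (by rw [hkeys]; simp [List.nodup_append, hnd]; exact fun a ha h => htk (h ▸ ha))]
        rw [PySem.Dict.items_insert_of_not_contains d _ hcf, List.map_append]
        have hcont1 : (fun x => !(d.insert t [name]).contains x)
            = (fun x => !(x == t) && !d.contains x) := by
          funext x
          rw [PySem.Dict.contains_eq_decide_mem_keys, hkeys,
            PySem.Dict.contains_eq_decide_mem_keys (d := d)]
          by_cases hxt : x = t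
          · subst hxt; simp
          · have hb : (x == t) = false := beq_eq_false_iff_ne.mpr hxt
            simp [hb, hxt]
        rw [hcont1]
        rw [pv_dedup_cons]
        have hfc : (fun t' => !d.contains t') t = true := by simp [hcf]
        simp only [List.filter_cons, hfc, if_true, List.filter_filter, List.map_cons]
        rw [List.append_assoc]
        congr 1
        · apply List.map_congr_left
          intro q hq
          have hqk : q.1 ∈ d.keys := PySem.Dict.mem_keys_of_mem_items d hq
          have hqt : ¬ q.1 = t := fun h => htk (h ▸ hqk)
          simp [hqt]
        · have h1 : (ts.contains t && !([name] : List String).contains name) = false := by simp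
          simp only [h1, Bool.false_eq_true, if_false, List.map_nil, List.cons_append,
            List.nil_append]
          congr 2
          apply List.filter_congr
          intro x hx
          by_cases hxt : x = t
          · subst hxt; simp [hcf]
          · have hb1 : (x == t) = false := beq_eq_false_iff_ne.mpr hxt
            have hb2 : (t == x) = false := beq_eq_false_iff_ne.mpr fun hh => hxt hh.symm
            simp [hb1, hb2]

-- one symbol's contribution to a type's row
theorem pv_gather_cons (name : String) (tys : List String)
    (ps : List (String × List String)) (t : String) :
    pvGather ((name, tys) :: ps) t
      = if tys.contains t then name :: pvGather ps t else pvGather ps t := by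
  simp only [pvGather, List.filter_cons]
  by_cases h : t ∈ tys
  · simp [h]
  · simp [h]

-- characterization of A's outer loop
theorem pv_main (st : List (String × List String))
    (d : PySem.Dict String (List String)) (hnd : d.keys.Nodup)
    (hpre : (st.map Prod.fst).Nodup)
    (hfresh : ∀ q ∈ d.items, ∀ x ∈ st.map Prod.fst, ¬ x ∈ q.2) :
    (st.foldl pvStep d).items
      = d.items.map (fun q => (q.1, q.2 ++ pvGather st q.1))
        ++ ((PySem.List.dedup (st.flatMap (fun p => p.2))).filter
              (fun t => !d.contains t)).map (fun t => (t, pvGather st t)) := by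
  induction st generalizing d with
  | nil => simp [pvGather, PySem.List.dedup]
  | cons p ps ih =>
      obtain ⟨name, tys⟩ := p
      rw [List.foldl_cons]
      have hI := pv_inner name tys d hnd
      set d1 := tys.foldl (stepA name) d with hd1
      have hkeys1 : d1.keys = d.keys ++ (PySem.List.dedup tys).filter (fun x => !d.contains x) := by
        simp only [PySem.Dict.keys, hI, List.map_append, List.map_map]
        congr 1
        · apply List.map_congr_left
          intro q hq
          simp only [Function.comp_apply]
          split <;> rfl
        · have hid : ((fun (x : String × List String) => x.1) ∘ fun t : String => (t, ([name] : List String))) = id := rfl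
          rw [hid, List.map_id]
      have hnd1 : d1.keys.Nodup := by
        rw [hkeys1]
        refine List.Nodup.append hnd ((PySem.List.nodup_dedup tys).filter _) ?_
        intro a ha hb
        have hbm := List.of_mem_filter hb
        rw [PySem.Dict.contains_eq_decide_mem_keys] at hbm
        simp [ha] at hbm
      have hcont1 : ∀ x, d1.contains x = (d.contains x || tys.contains x) := by
        intro x
        rw [PySem.Dict.contains_eq_decide_mem_keys, hkeys1,
          PySem.Dict.contains_eq_decide_mem_keys (d := d)]
        by_cases hx : x ∈ d.keys
        · simp [hx]
        · simp only [List.mem_append, hx, false_or, decide_eq_true_eq]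
          by_cases ht : x ∈ tys
          · simp [List.mem_filter, (PySem.List.mem_dedup tys x).2 ht,
              PySem.Dict.contains_eq_decide_mem_keys, hx, ht]
          · simp [List.mem_filter, fun h => ht ((PySem.List.mem_dedup tys x).1 h), ht]
      have hname : name ∉ ps.map Prod.fst := by
        simp only [List.map_cons, List.nodup_cons] at hpre
        exact hpre.1
      have hps : (ps.map Prod.fst).Nodup := by
        simp only [List.map_cons, List.nodup_cons] at hpre
        exact hpre.2
      have hfresh1 : ∀ q ∈ d1.items, ∀ x ∈ ps.map Prod.fst, ¬ x ∈ q.2 := by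
        intro q hq x hx
        rw [hI] at hq
        rcases List.mem_append.mp hq with hq | hq
        · obtain ⟨r, hr, hrq⟩ := List.mem_map.mp hq
          have hold : ¬ x ∈ r.2 := hfresh r hr x (by simp [hx])
          have hxn : ¬ x = name := fun h => hname (h ▸ hx)
          subst hrq
          by_cases hcq : (tys.contains r.1 && !r.2.contains name) = true
          · simp only [hcq, if_true]
            intro hmem
            rcases List.mem_append.mp hmem with h | h
            · exact hold h
            · exact hxn (by simpa using h)
          · simp only [hcq, Bool.false_eq_true, if_false]
            exact hold
        · obtain ⟨t, ht, htq⟩ := List.mem_map.mp hq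
          subst htq
          intro hmem
          have hxeq : x = name := by simpa using hmem
          exact hname (hxeq ▸ hx)
      rw [show pvStep d (name, tys) = d1 from rfl]
      rw [ih d1 hnd1 hps hfresh1]
      rw [hI, List.map_append, List.map_map, List.map_map]
      -- three parts: old entries, the new keys from tys, the new keys from ps
      rw [List.flatMap_cons, pv_dedup_append, List.filter_append, List.map_append,
        List.filter_filter, List.append_assoc]
      congr 1
      · -- old entries of d
        apply List.map_congr_left
        intro q hq
        have hnm : ¬ name ∈ q.2 := hfresh q hq name (by simp)
        have hnmc : q.2.contains name = false := by
          simp [List.contains_iff_mem, hnm]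
        rw [pv_gather_cons]
        by_cases hmt : q.1 ∈ tys
        · have hct : tys.contains q.1 = true := by simpa using hmt
          simp [Function.comp, hmt, hnm, List.append_assoc]
        · have hct : tys.contains q.1 = false := by simpa using hmt
          simp [Function.comp, hmt, hnm]
      · congr 1
        · -- keys newly created while processing tys
          apply List.map_congr_left
          intro t ht
          have htm : t ∈ tys := (PySem.List.mem_dedup tys t).1 (List.mem_of_mem_filter ht)
          have htys : tys.contains t = true := by simpa using htm
          rw [pv_gather_cons, htys]
          simp [Function.comp]
        · -- keys newly created while processing ps
          have hpred : (fun t => !d1.contains t) = (fun a => !tys.contains a && !d.contains a) := by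
            funext x
            rw [hcont1 x]
            cases d.contains x <;> cases tys.contains x <;> rfl
          rw [hpred]
          have hpred2 : (fun a : String => !d.contains a && !(name, tys).2.contains a)
              = (fun a => !tys.contains a && !d.contains a) := by
            funext a
            show (!d.contains a && !tys.contains a) = (!tys.contains a && !d.contains a)
            cases d.contains a <;> cases tys.contains a <;> rfl
          rw [hpred2]
          apply List.map_congr_left
          intro t ht
          have htf : tys.contains t = false := by
            have hft := List.of_mem_filter ht
            cases hh : tys.contains t
            · rfl
            · rw [hh] at hft
              simp at hft
          rw [pv_gather_cons, htf]
          simp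

-- B's per-type row computed over the (name, set(types)) pairs equals the direct scan
theorem pv_row_eq (st : List (String × List String)) (t : String) :
    ((st.map (fun p => (p.1, PySem.Set.ofList p.2))).filter
        (fun q => PySem.Set.contains q.2 t)).map Prod.fst
      = (st.filter (fun p => p.2.contains t)).map Prod.fst := by
  rw [List.filter_map, List.map_map]
  congr 1
  apply List.filter_congr
  intro p _
  show PySem.Set.contains (PySem.Set.ofList p.2) t = p.2.contains t
  simp only [PySem.Set.contains]
  by_cases h : t ∈ p.2
  · simp [h, (PySem.Set.mem_ofList p.2 t).2 h]
  · simp [h, fun hh => h ((PySem.Set.mem_ofList p.2 t).1 hh)]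

theorem pv_ofList_items (l : List (String × List String)) (hnd : (l.map Prod.fst).Nodup) :
    (PySem.Dict.ofList l).items = l := by
  have := PySem.Dict.items_foldl_insert_fresh (l := l) (k := Prod.fst) (v := Prod.snd)
    (d := PySem.Dict.empty) (by simp) (by simpa using hnd)
  simpa using this

-- ===== VERDICT (by name: the statement is the Claim_ definition above) =====
theorem invert_table_spec : Claim_equal_invert_table := by
  intro st _ hpre
  unfold Spec_invert_table invert_table invert_table_alt
  have h := pv_main st PySem.Dict.empty (by simp [PySem.Dict.empty, PySem.Dict.keys])
    hpre (by simp [PySem.Dict.empty])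
  simp only [pv_row_eq]
  rw [pv_ofList_items]
  · simpa [pvStep, pvGather, PySem.Dict.empty, PySem.Dict.items] using h
  · rw [List.map_map]
    have hid : (Prod.fst ∘ fun t => (t, (st.filter (fun p => p.2.contains t)).map Prod.fst)) = id := rfl
    rw [hid, List.map_id]
    exact PySem.List.nodup_dedup _
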